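-- pv_equiv track=rewrite | github.com/M1229012/Stock_attention_web | app.py | prev_trade_date
-- ===== SOURCE A (Python) =====
-- def prev_trade_date(d, cal_dates):
--     if not cal_dates: return None
--     try: idx = cal_dates.index(d)
--     except:
--         for i in range(len(cal_dates)-1, -1, -1):
--             if cal_dates[i] < d: return cal_dates[i]
--         return None
--     if idx - 1 >= 0: return cal_dates[idx - 1]
--     return None
-- ===== SOURCE B (Python) =====
-- def prev_trade_date(d, cal_dates):
--     best = None
--     prev = None
--     for x in cal_dates:
--         if x == d:
--             return prev
--         if x < d:
--             best = x
--         prev = x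
--     return best
-- ===== Notes on version B (the rewrite author's own statement) =====
-- stated objective: simpler
-- what changed: Replaces A's .index/try-except followed by a second reverse index scan with one forward pass keeping the previous element and the last element seen that is < d, returning at the first occurrence of d.
import Mathlib
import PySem

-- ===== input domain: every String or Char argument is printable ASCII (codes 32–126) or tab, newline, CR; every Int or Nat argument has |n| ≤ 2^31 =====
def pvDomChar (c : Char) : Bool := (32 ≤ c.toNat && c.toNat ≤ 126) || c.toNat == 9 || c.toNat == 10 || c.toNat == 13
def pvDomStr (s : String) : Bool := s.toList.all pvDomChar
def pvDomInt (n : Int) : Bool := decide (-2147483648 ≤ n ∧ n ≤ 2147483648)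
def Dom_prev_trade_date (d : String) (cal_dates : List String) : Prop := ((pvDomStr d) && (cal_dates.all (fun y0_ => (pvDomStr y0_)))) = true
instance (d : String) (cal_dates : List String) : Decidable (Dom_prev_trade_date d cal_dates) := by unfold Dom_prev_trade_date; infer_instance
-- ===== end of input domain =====

-- B replaces A's .index/try-except plus a second reverse index scan by one forward pass
-- keeping the previous element and the last element seen that is < d (objective: simpler).

-- ===== PORT A =====
-- the 'for i in range(len(cal_dates)-1, -1, -1): if cal_dates[i] < d: return cal_dates[i]' loop,
-- with early return, as structural recursion over the index list
def pvRevScan (d : String) (cal : List String) : List Int → Option String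
  | [] => none
  | i :: rest =>
    match PySem.List.pyGet? cal i with
    | some x => if x < d then some x else pvRevScan d cal rest
    | none => none   -- unreachable: every i produced by the range is in bounds

def prev_trade_date (d : String) (cal_dates : List String) : Option String :=
  if cal_dates = [] then none
  else
    match PySem.List.index? cal_dates d with
    | some idx =>
        if (idx : Int) - 1 ≥ 0 then PySem.List.pyGet? cal_dates ((idx : Int) - 1) else none
    | none => pvRevScan d cal_dates (PySem.List.pyRange ((cal_dates.length : Int) - 1) (-1) (-1))

-- ===== PORT B =====
-- single forward pass: prev = element just seen, best = last element seen that is < d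
def pvAltGo (d : String) : List String → Option String → Option String → Option String
  | [], _, best => best
  | x :: rest, prev, best =>
    if x = d then prev
    else pvAltGo d rest (some x) (if x < d then some x else best)

def prev_trade_date_alt (d : String) (cal_dates : List String) : Option String :=
  pvAltGo d cal_dates none none

-- ===== PRECONDITION & SPEC =====
def Spec_prev_trade_date (d : String) (cal_dates : List String) (out : Option String) : Prop := out = prev_trade_date_alt d cal_dates
instance (d : String) (cal_dates : List String) (out : Option String) : Decidable (Spec_prev_trade_date d cal_dates out) := by unfold Spec_prev_trade_date; infer_instance

-- ===== CLAIM (what is proved, stated in full; the proofs are below) =====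
def Claim_equal_prev_trade_date : Prop := ∀ (d : String) (cal_dates : List String), Dom_prev_trade_date d cal_dates → Spec_prev_trade_date d cal_dates (prev_trade_date d cal_dates)

-- ===== LEMMAS AND PROOFS =====

-- B's pass through a prefix not containing d just updates prev to the prefix's last element
theorem pvAltGo_append_found (d : String) (suf : List String) :
    ∀ (pre : List String) (prev best : Option String), d ∉ pre →
      pvAltGo d (pre ++ d :: suf) prev best =
        (match pre.getLast? with | some y => some y | none => prev) := by
  intro pre
  induction pre with
  | nil => intro prev best _; simp [pvAltGo]
  | cons x xs ih =>
    intro prev best hd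
    have hx : x ≠ d := fun h => hd (by simp [h])
    have hxs : d ∉ xs := fun h => hd (by simp [h])
    simp only [List.cons_append, pvAltGo, if_neg hx]
    rw [ih _ _ hxs]
    cases xs with
    | nil => simp
    | cons a as =>
      rcases h : (a :: as).getLast? with _ | y
      · simp [List.getLast?_eq_none_iff] at h
      · simp [h]

-- when d is absent, B returns the last element < d (first from the right), else best
theorem pvAltGo_not_mem (d : String) :
    ∀ (cal : List String) (prev best : Option String), d ∉ cal →
      pvAltGo d cal prev best =
        (match cal.reverse.find? (fun x => decide (x < d)) with
         | some y => some y | none => best) := by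
  intro cal
  induction cal with
  | nil => intro prev best _; simp [pvAltGo]
  | cons x xs ih =>
    intro prev best hd
    have hx : x ≠ d := fun h => hd (by simp [h])
    have hxs : d ∉ xs := fun h => hd (by simp [h])
    simp only [pvAltGo, if_neg hx]
    rw [ih _ _ hxs]
    rw [List.reverse_cons, List.find?_append]
    cases hfind : xs.reverse.find? (fun x => decide (x < d)) with
    | some y => simp
    | none =>
      by_cases hlt : x < d <;> simp [List.find?, hlt]

-- appending an element the scan's indices never reach does not change the scan
theorem pvRevScan_append_irrel (d : String) (ys : List String) (y : String) :
    ∀ (r : List Int), (∀ i ∈ r, 0 ≤ i ∧ i < (ys.length : Int)) →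
      pvRevScan d (ys ++ [y]) r = pvRevScan d ys r := by
  intro r
  induction r with
  | nil => intro _; rfl
  | cons i rest ih =>
    intro hr
    obtain ⟨h0, hlt⟩ := hr i (by simp)
    have hget : PySem.List.pyGet? (ys ++ [y]) i = PySem.List.pyGet? ys i := by
      rw [PySem.List.pyGet?_of_nonneg _ h0, PySem.List.pyGet?_of_nonneg _ h0]
      rw [List.getElem?_append_left (by omega)]
    simp only [pvRevScan, hget]
    cases PySem.List.pyGet? ys i with
    | none => rfl
    | some x =>
      by_cases hlt' : x < d <;> simp [hlt', ih (fun j hj => hr j (by simp [hj]))]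

-- A's reverse index scan is find? over the reversed list
theorem pvRevScan_eq_find (d : String) (cal : List String) :
    pvRevScan d cal (PySem.List.pyRange ((cal.length : Int) - 1) (-1) (-1)) =
      cal.reverse.find? (fun x => decide (x < d)) := by
  induction cal using List.reverseRecOn with
  | nil =>
    simp only [List.length_nil, Nat.cast_zero, zero_sub]
    rw [PySem.List.pyRange_neg_one_eq_nil le_rfl]
    simp [pvRevScan]
  | append_singleton ys y ih =>
    have hlen : (((ys ++ [y]).length : Int)) - 1 = (ys.length : Int) := by simp
    rw [hlen, PySem.List.pyRange_neg_one_cons (by omega : (-1:Int) < (ys.length : Int))]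
    have hget : PySem.List.pyGet? (ys ++ [y]) (ys.length : Int) = some y :=
      PySem.List.pyGet?_append_length ys [] y
    simp only [pvRevScan, hget, List.reverse_append, List.reverse_singleton,
      List.singleton_append, List.find?_cons]
    by_cases hlt : y < d
    · simp [hlt]
    · simp only [hlt, decide_false]
      rw [pvRevScan_append_irrel d ys y _ (fun i hi => by
        rw [PySem.List.mem_pyRange_neg_one] at hi; omega)]
      exact ih

-- ===== VERDICT (by name: the statement is the Claim_ definition above) =====
theorem prev_trade_date_spec : Claim_equal_prev_trade_date := by
  intro d cal _
  unfold Spec_prev_trade_date prev_trade_date prev_trade_date_alt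
  cases hidx : PySem.List.index? cal d with
  | some idx =>
    rw [PySem.List.index?_eq_some_iff] at hidx
    obtain ⟨pre, suf, rfl, hlen, hpre⟩ := hidx
    rw [if_neg (by simp : pre ++ d :: suf ≠ [])]
    rw [pvAltGo_append_found d suf pre none none hpre]
    subst hlen
    dsimp only
    rcases List.eq_nil_or_concat pre with rfl | ⟨p, y, rfl⟩
    · simp
    · simp only [List.concat_eq_append]
      rw [if_pos (by simp : ((p ++ [y]).length : Int) - 1 ≥ 0)]
      rw [(by simp : ((p ++ [y]).length : Int) - 1 = (p.length : Int))]
      rw [(by simp : (p ++ [y]) ++ d :: suf = p ++ y :: (d :: suf))]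
      rw [PySem.List.pyGet?_append_length p (d :: suf) y]
      simp
  | none =>
    have hmem : d ∉ cal := (PySem.List.index?_eq_none_iff cal d).mp hidx
    by_cases hnil : cal = []
    · subst hnil; simp [pvAltGo]
    · rw [if_neg hnil, pvRevScan_eq_find, pvAltGo_not_mem d cal none none hmem]
      dsimp only
      cases List.find? (fun x => decide (x < d)) cal.reverse <;> rfl
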